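-- pv_equiv track=rewrite | github.com/FaustRepos/Vigenere | attack_by_kasiki.py | analyze_distances
-- ===== SOURCE A (Python) =====
-- from collections import Counter
--
-- def analyze_distances(distances: list[int], max_key_length: int) -> list[int]:
--     factors = []
--
--     for distance in distances:
--         for i in range(2, min(distance + 1, max_key_length + 1)):
--             if distance % i == 0:
--                 factors.append(i)
--
--     if not factors:
--         return []
--
--     factor_counts = Counter(factors)
--     sorted_factors = sorted(factor_counts.items(), key=lambda x: x[1], reverse=True)
--
--     return [factor for factor, count in sorted_factors]
-- ===== SOURCE B (Python) =====
-- from collections import Counter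
--
-- def analyze_distances(distances: list[int], max_key_length: int) -> list[int]:
--     # Per distance, trial division up to min(sqrt(distance), max_key_length); each
--     # divisor found pairs with its cofactor, and the large cofactors are emitted in
--     # ascending order so the Counter insertion (tie) order matches the original.
--     factors = []
--     for d in distances:
--         if d >= 2 and max_key_length >= 2:
--             small = []
--             large = [d] if d <= max_key_length else []
--             i = 2
--             while i * i <= d and i <= max_key_length:
--                 if d % i == 0:
--                     small.append(i)
--                     c = d // i
--                     if c != i and c <= max_key_length:
--                         large.append(c)
--                 i += 1
--             factors.extend(small)
--             factors.extend(reversed(large))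
--     if not factors:
--         return []
--     factor_counts = Counter(factors)
--     sorted_factors = sorted(factor_counts.items(), key=lambda x: x[1], reverse=True)
--     return [factor for factor, count in sorted_factors]
-- ===== Notes on version B (the rewrite author's own statement) =====
-- stated objective: faster
-- what changed: Per distance, A scans every candidate factor 2..min(distance, max_key_length); B trial-divides only up to min(sqrt(distance), max_key_length) and emits each divisor together with its complementary cofactor in ascending order, preserving the Counter insertion (tie) order exactly.
import Mathlib
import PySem

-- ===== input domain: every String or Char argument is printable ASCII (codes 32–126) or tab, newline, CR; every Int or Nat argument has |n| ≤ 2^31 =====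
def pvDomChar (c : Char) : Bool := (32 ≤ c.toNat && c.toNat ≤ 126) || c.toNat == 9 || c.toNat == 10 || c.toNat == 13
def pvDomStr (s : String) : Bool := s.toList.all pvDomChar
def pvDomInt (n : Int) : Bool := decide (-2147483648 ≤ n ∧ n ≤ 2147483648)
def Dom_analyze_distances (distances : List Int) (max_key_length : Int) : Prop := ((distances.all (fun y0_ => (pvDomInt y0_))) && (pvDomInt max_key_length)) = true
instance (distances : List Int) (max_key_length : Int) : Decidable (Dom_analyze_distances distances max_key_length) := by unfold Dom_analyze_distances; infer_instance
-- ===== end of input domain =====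

-- B replaces A's linear divisor scan of each distance (up to min(distance, max_key_length)) by
-- trial division up to min(sqrt(distance), max_key_length), emitting the complementary divisors
-- in ascending order so the Counter insertion (tie) order is unchanged; objective: faster.

-- ===== PORT A =====
def analyze_distances (distances : List Int) (max_key_length : Int) : List Int :=
  let factors := distances.foldl (fun acc distance =>
    (PySem.List.pyRange 2 (min (distance + 1) (max_key_length + 1)) 1).foldl
      (fun acc2 i => if PySem.Int.mod distance i == 0 then acc2 ++ [i] else acc2) acc) []
  if factors = [] then []
  else
    (PySem.List.sorted (PySem.Dict.counter factors).items (fun x => x.2) true).map (fun p => p.1)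

-- ===== PORT B =====
-- the `while i * i <= d and i <= max_key_length` loop of Source B: carries the (small, large)
-- accumulators it appends to; `fuel` bounds the remaining iterations (d.toNat + 1 always suffices)
def pvDivLoop (d mkl : Int) : Int → Nat → List Int × List Int → List Int × List Int
  | _, 0, acc => acc
  | i, fuel + 1, (small, large) =>
    if i * i ≤ d ∧ i ≤ mkl then
      if PySem.Int.mod d i == 0 then
        let small' := small ++ [i]
        let c := PySem.Int.floordiv d i
        let large' := if c ≠ i ∧ c ≤ mkl then large ++ [c] else large
        pvDivLoop d mkl (i + 1) fuel (small', large')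
      else pvDivLoop d mkl (i + 1) fuel (small, large)
    else (small, large)

def analyze_distances_alt (distances : List Int) (max_key_length : Int) : List Int :=
  let factors := distances.foldl (fun acc d =>
    if 2 ≤ d ∧ 2 ≤ max_key_length then
      let large0 : List Int := if d ≤ max_key_length then [d] else []
      let sl := pvDivLoop d max_key_length 2 (d.toNat + 1) ([], [])
      acc ++ sl.1 ++ (large0 ++ sl.2).reverse
    else acc) []
  if factors = [] then []
  else
    (PySem.List.sorted (PySem.Dict.counter factors).items (fun x => x.2) true).map (fun p => p.1)

-- ===== PRECONDITION & SPEC =====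
def Spec_analyze_distances (distances : List Int) (max_key_length : Int) (out : List Int) : Prop := out = analyze_distances_alt distances max_key_length
instance (distances : List Int) (max_key_length : Int) (out : List Int) : Decidable (Spec_analyze_distances distances max_key_length out) := by unfold Spec_analyze_distances; infer_instance

-- ===== CLAIM (what is proved, stated in full; the proofs are below) =====
def Claim_equal_analyze_distances : Prop := ∀ (distances : List Int) (max_key_length : Int), Dom_analyze_distances distances max_key_length → Spec_analyze_distances distances max_key_length (analyze_distances distances max_key_length)

-- ===== LEMMAS AND PROOFS =====

-- proof-time, non-accumulator form of the while loop
def pvDivLoopP (d mkl : Int) : Int → Nat → List Int × List Int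
  | _, 0 => ([], [])
  | i, fuel + 1 =>
    if i * i ≤ d ∧ i ≤ mkl then
      let rest := pvDivLoopP d mkl (i + 1) fuel
      if PySem.Int.mod d i == 0 then
        let s := i :: rest.1
        let c := PySem.Int.floordiv d i
        let l := if c ≠ i ∧ c ≤ mkl then c :: rest.2 else rest.2
        (s, l)
      else rest
    else ([], [])

-- the tail-recursive port helper just appends onto its accumulators
theorem pvDivLoop_eq_pure (d mkl : Int) :
    ∀ (fuel : Nat) (i : Int) (s0 l0 : List Int),
      pvDivLoop d mkl i fuel (s0, l0) =
        (s0 ++ (pvDivLoopP d mkl i fuel).1, l0 ++ (pvDivLoopP d mkl i fuel).2) := by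
  intro fuel
  induction fuel with
  | zero => intro i s0 l0; simp [pvDivLoop, pvDivLoopP]
  | succ fuel ih =>
    intro i s0 l0
    by_cases hle : i * i ≤ d ∧ i ≤ mkl
    · simp only [pvDivLoop, pvDivLoopP, if_pos hle]
      by_cases hmod : (PySem.Int.mod d i == 0) = true
      · rw [hmod]
        simp only [if_true]
        by_cases hc : PySem.Int.floordiv d i ≠ i ∧ PySem.Int.floordiv d i ≤ mkl
        · simp [if_pos hc, ih]
        · simp [if_neg hc, ih]
      · rw [Bool.of_not_eq_true hmod]
        simp only [Bool.false_eq_true, if_false]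
        exact ih (i + 1) s0 l0
    · simp [pvDivLoop, pvDivLoopP, if_neg hle]

-- what A appends for one distance: the ascending divisors of d in [2, min(d, mkl)]
def pvTarget (d mkl : Int) : List Int :=
  (PySem.List.pyRange 2 (min (d + 1) (mkl + 1)) 1).filter (fun i => PySem.Int.mod d i == 0)

-- what B appends for one distance
def pvPerB (d mkl : Int) : List Int :=
  if 2 ≤ d ∧ 2 ≤ mkl then
    let large0 : List Int := if d ≤ mkl then [d] else []
    let sl := pvDivLoopP d mkl 2 (d.toNat + 1)
    sl.1 ++ (large0 ++ sl.2).reverse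
  else []

theorem eq_of_mem_iff_pairwise_lt (l1 l2 : List Int) (h : ∀ x, x ∈ l1 ↔ x ∈ l2)
    (s1 : l1.Pairwise (· < ·)) (s2 : l2.Pairwise (· < ·)) : l1 = l2 := by
  have hp : l1.Perm l2 :=
    (List.perm_ext_iff_of_nodup (s1.imp ne_of_lt) (s2.imp ne_of_lt)).2 h
  exact hp.eq_of_pairwise (fun a b _ _ h1 h2 => le_antisymm h1 h2)
    (s1.imp le_of_lt) (s2.imp le_of_lt)

theorem pv_fuel_step {d i : Int} {fuel : Nat} (hi : 2 ≤ i) (hle : i * i ≤ d)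
    (hf : (d + 1 - i * i).toNat ≤ fuel + 1) : (d + 1 - (i + 1) * (i + 1)).toNat ≤ fuel := by
  have hiq : (i + 1) * (i + 1) = i * i + 2 * i + 1 := by ring
  rw [hiq]
  generalize hgen : i * i = a at hf hle ⊢
  omega

theorem pv_fdiv_mul {d j : Int} (hj : 0 < j) (hd : j ∣ d) :
    PySem.Int.floordiv d j * j = d := by
  rw [PySem.Int.floordiv_eq_ediv_of_pos hj]
  exact Int.ediv_mul_cancel hd

theorem pvDivLoopP_small_mem (d mkl : Int) :
    ∀ (fuel : Nat) (i k : Int), 2 ≤ i → (d + 1 - i * i).toNat ≤ fuel →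
      (k ∈ (pvDivLoopP d mkl i fuel).1 ↔ i ≤ k ∧ k * k ≤ d ∧ k ≤ mkl ∧ k ∣ d) := by
  intro fuel
  induction fuel with
  | zero =>
    intro i k hi hf
    simp only [pvDivLoopP, List.not_mem_nil, false_iff]
    rintro ⟨hik, hkk, -, -⟩
    have : i * i ≤ k * k := by nlinarith
    omega
  | succ fuel ih =>
    intro i k hi hf
    by_cases hle : i * i ≤ d ∧ i ≤ mkl
    · have hf' := pv_fuel_step hi hle.1 hf
      have ihk := ih (i + 1) k (by omega) hf'
      simp only [pvDivLoopP, if_pos hle]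
      by_cases hdvd : i ∣ d
      · have hmod : (PySem.Int.mod d i == 0) = true := by
          simp [PySem.Int.mod_eq_zero_iff_dvd, hdvd]
        rw [hmod]
        simp only [if_true, List.mem_cons, ihk]
        constructor
        · rintro (rfl | ⟨h1, h2, h3, h4⟩)
          · exact ⟨le_refl _, hle.1, hle.2, hdvd⟩
          · exact ⟨by omega, h2, h3, h4⟩
        · rintro ⟨h1, h2, h3, h4⟩
          rcases eq_or_lt_of_le h1 with rfl | hlt
          · exact Or.inl rfl
          · exact Or.inr ⟨by omega, h2, h3, h4⟩
      · have hmod : (PySem.Int.mod d i == 0) = false := by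
          simp [PySem.Int.mod_eq_zero_iff_dvd, hdvd]
        rw [hmod]
        simp only [Bool.false_eq_true, if_false, ihk]
        constructor
        · rintro ⟨h1, h2, h3, h4⟩
          exact ⟨by omega, h2, h3, h4⟩
        · rintro ⟨h1, h2, h3, h4⟩
          rcases eq_or_lt_of_le h1 with rfl | hlt
          · exact absurd h4 hdvd
          · exact ⟨by omega, h2, h3, h4⟩
    · simp only [pvDivLoopP, if_neg hle, List.not_mem_nil, false_iff]
      rintro ⟨hik, hkk, hkm, -⟩
      rcases not_and_or.1 hle with hd | hm
      · have : i * i ≤ k * k := by nlinarith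
        omega
      · omega
    
theorem pvDivLoopP_large_mem (d mkl : Int) :
    ∀ (fuel : Nat) (i k : Int), 2 ≤ i → (d + 1 - i * i).toNat ≤ fuel →
      (k ∈ (pvDivLoopP d mkl i fuel).2 ↔
        ∃ j : Int, i ≤ j ∧ j * j ≤ d ∧ j ≤ mkl ∧ j ∣ d ∧ k = PySem.Int.floordiv d j ∧ k ≠ j ∧ k ≤ mkl) := by
  intro fuel
  induction fuel with
  | zero =>
    intro i k hi hf
    simp only [pvDivLoopP, List.not_mem_nil, false_iff]
    rintro ⟨j, hij, hjj, -⟩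
    have : i * i ≤ j * j := by nlinarith
    omega
  | succ fuel ih =>
    intro i k hi hf
    by_cases hle : i * i ≤ d ∧ i ≤ mkl
    · have hf' := pv_fuel_step hi hle.1 hf
      have ihk := ih (i + 1) k (by omega) hf'
      simp only [pvDivLoopP, if_pos hle]
      by_cases hdvd : i ∣ d
      · have hmod : (PySem.Int.mod d i == 0) = true := by
          simp [PySem.Int.mod_eq_zero_iff_dvd, hdvd]
        rw [hmod]
        simp only [if_true]
        by_cases hc : PySem.Int.floordiv d i ≠ i ∧ PySem.Int.floordiv d i ≤ mkl
        · simp only [if_pos hc, List.mem_cons, ihk]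
          constructor
          · rintro (rfl | ⟨j, h1, h2, h3, h4, h5, h6, h7⟩)
            · exact ⟨i, le_refl _, hle.1, hle.2, hdvd, rfl, hc.1, hc.2⟩
            · exact ⟨j, by omega, h2, h3, h4, h5, h6, h7⟩
          · rintro ⟨j, hij, hjj, hjm, hjd, hk, hne, hkm⟩
            rcases eq_or_lt_of_le hij with rfl | hlt
            · exact Or.inl hk
            · exact Or.inr ⟨j, by omega, hjj, hjm, hjd, hk, hne, hkm⟩
        · simp only [if_neg hc, ihk]
          constructor
          · rintro ⟨j, h1, h2, h3, h4, h5, h6, h7⟩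
            exact ⟨j, by omega, h2, h3, h4, h5, h6, h7⟩
          · rintro ⟨j, hij, hjj, hjm, hjd, hk, hne, hkm⟩
            rcases eq_or_lt_of_le hij with rfl | hlt
            · exact absurd ⟨hk ▸ hne, hk ▸ hkm⟩ hc
            · exact ⟨j, by omega, hjj, hjm, hjd, hk, hne, hkm⟩
      · have hmod : (PySem.Int.mod d i == 0) = false := by
          simp [PySem.Int.mod_eq_zero_iff_dvd, hdvd]
        rw [hmod]
        simp only [Bool.false_eq_true, if_false, ihk]
        constructor
        · rintro ⟨j, h1, h2, h3, h4, h5, h6, h7⟩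
          exact ⟨j, by omega, h2, h3, h4, h5, h6, h7⟩
        · rintro ⟨j, hij, hjj, hjm, hjd, hk, hne, hkm⟩
          rcases eq_or_lt_of_le hij with rfl | hlt
          · exact absurd hjd hdvd
          · exact ⟨j, by omega, hjj, hjm, hjd, hk, hne, hkm⟩
    · simp only [pvDivLoopP, if_neg hle, List.not_mem_nil, false_iff]
      rintro ⟨j, hij, hjj, hjm, -⟩
      rcases not_and_or.1 hle with hd | hm
      · have : i * i ≤ j * j := by nlinarith
        omega
      · omega

theorem pvDivLoopP_small_sorted (d mkl : Int) :
    ∀ (fuel : Nat) (i : Int), 2 ≤ i → (d + 1 - i * i).toNat ≤ fuel →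
      (pvDivLoopP d mkl i fuel).1.Pairwise (· < ·) := by
  intro fuel
  induction fuel with
  | zero => intro i hi hf; simp [pvDivLoopP]
  | succ fuel ih =>
    intro i hi hf
    by_cases hle : i * i ≤ d ∧ i ≤ mkl
    · have hf' := pv_fuel_step hi hle.1 hf
      have ihp := ih (i + 1) (by omega) hf'
      simp only [pvDivLoopP, if_pos hle]
      by_cases hdvd : i ∣ d
      · have hmod : (PySem.Int.mod d i == 0) = true := by
          simp [PySem.Int.mod_eq_zero_iff_dvd, hdvd]
        rw [hmod]
        simp only [if_true]
        refine List.Pairwise.cons ?_ ihp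
        intro x hx
        have := ((pvDivLoopP_small_mem d mkl fuel (i + 1) x (by omega) hf').1 hx).1
        omega
      · have hmod : (PySem.Int.mod d i == 0) = false := by
          simp [PySem.Int.mod_eq_zero_iff_dvd, hdvd]
        rw [hmod]
        simp only [Bool.false_eq_true, if_false]; exact ihp
    · simp [pvDivLoopP, if_neg hle]

theorem pvDivLoopP_large_sorted (d mkl : Int) :
    ∀ (fuel : Nat) (i : Int), 2 ≤ i → (d + 1 - i * i).toNat ≤ fuel →
      (pvDivLoopP d mkl i fuel).2.Pairwise (· > ·) := by
  intro fuel
  induction fuel with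
  | zero => intro i hi hf; simp [pvDivLoopP]
  | succ fuel ih =>
    intro i hi hf
    by_cases hle : i * i ≤ d ∧ i ≤ mkl
    · have hf' := pv_fuel_step hi hle.1 hf
      have ihp := ih (i + 1) (by omega) hf'
      simp only [pvDivLoopP, if_pos hle]
      by_cases hdvd : i ∣ d
      · have hmod : (PySem.Int.mod d i == 0) = true := by
          simp [PySem.Int.mod_eq_zero_iff_dvd, hdvd]
        rw [hmod]
        simp only [if_true]
        by_cases hc : PySem.Int.floordiv d i ≠ i ∧ PySem.Int.floordiv d i ≤ mkl
        · simp only [if_pos hc]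
          refine List.Pairwise.cons ?_ ihp
          intro x hx
          obtain ⟨j, hij, hjj, hjm, hjd, hk, -, -⟩ :=
            (pvDivLoopP_large_mem d mkl fuel (i + 1) x (by omega) hf').1 hx
          have hcm : PySem.Int.floordiv d i * i = d := pv_fdiv_mul (by omega) hdvd
          have hkm : x * j = d := by rw [hk]; exact pv_fdiv_mul (by omega) hjd
          have hxpos : 0 < x := by nlinarith
          show x < PySem.Int.floordiv d i
          nlinarith [mul_lt_mul_of_pos_left (show i < j by omega) hxpos]
        · simp only [if_neg hc]; exact ihp
      · have hmod : (PySem.Int.mod d i == 0) = false := by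
          simp [PySem.Int.mod_eq_zero_iff_dvd, hdvd]
        rw [hmod]
        simp only [Bool.false_eq_true, if_false]; exact ihp
    · simp [pvDivLoopP, if_neg hle]

theorem pvPerB_eq_pvTarget (d mkl : Int) : pvPerB d mkl = pvTarget d mkl := by
  by_cases hg : 2 ≤ d ∧ 2 ≤ mkl
  · obtain ⟨hd2, hm2⟩ := hg
    have hf : (d + 1 - 2 * 2).toNat ≤ d.toNat + 1 := by omega
    have hlargeFact : ∀ y ∈ (pvDivLoopP d mkl 2 (d.toNat + 1)).2,
        2 ≤ y ∧ y ≤ mkl ∧ y ∣ d ∧ d < y * y ∧ y < d := by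
      intro y hy
      obtain ⟨j, hij, hjj, hjm, hjd, hk, hne, hkm⟩ :=
        (pvDivLoopP_large_mem d mkl (d.toNat + 1) 2 y (le_refl _) hf).1 hy
      have hyj : y * j = d := by rw [hk]; exact pv_fdiv_mul (by omega) hjd
      have hjy : j ≤ y := by nlinarith
      have hjy' : j < y := lt_of_le_of_ne hjy (by omega)
      have h2y : 2 ≤ y := by omega
      refine ⟨h2y, hkm, ⟨j, hyj.symm⟩, by nlinarith, by nlinarith⟩
    have hsmallFact : ∀ x ∈ (pvDivLoopP d mkl 2 (d.toNat + 1)).1,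
        2 ≤ x ∧ x ≤ mkl ∧ x ∣ d ∧ x * x ≤ d := by
      intro x hx
      obtain ⟨h1, h2, h3, h4⟩ :=
        (pvDivLoopP_small_mem d mkl (d.toNat + 1) 2 x (le_refl _) hf).1 hx
      exact ⟨h1, h3, h4, h2⟩
    simp only [pvPerB, pvTarget, if_pos (And.intro hd2 hm2)]
    apply eq_of_mem_iff_pairwise_lt
    · intro k
      simp only [List.mem_append, List.mem_reverse, List.mem_filter,
        PySem.List.mem_pyRange_one, beq_iff_eq, PySem.Int.mod_eq_zero_iff_dvd,
        lt_min_iff]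
      constructor
      · rintro (hx | hy)
        · obtain ⟨h1, h2, h3, h4⟩ := hsmallFact k hx
          exact ⟨⟨by omega, by nlinarith, by omega⟩, h3⟩
        · rcases hy with h0 | hl
          · by_cases hdm : d ≤ mkl
            · simp only [if_pos hdm, List.mem_singleton] at h0
              subst h0
              exact ⟨⟨by omega, by omega, by omega⟩, dvd_refl _⟩
            · simp [hdm] at h0
          · obtain ⟨h1, h2, h3, h4, h5⟩ := hlargeFact k hl
            exact ⟨⟨by omega, by omega, by omega⟩, h3⟩
      · rintro ⟨⟨h2k, hkd, hkm⟩, hdvd⟩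
        by_cases hkk : k * k ≤ d
        · exact Or.inl ((pvDivLoopP_small_mem d mkl (d.toNat + 1) 2 k (le_refl _) hf).2
            ⟨h2k, hkk, by omega, hdvd⟩)
        · obtain ⟨j, hj⟩ := hdvd
          have hk0 : 0 < k := by omega
          have hj1 : 1 ≤ j := by nlinarith
          by_cases hje : j = 1
          · subst hje
            have hkd' : k = d := by omega
            subst hkd'
            refine Or.inr (Or.inl ?_)
            simp [show k ≤ mkl by omega]
          · have hj2 : 2 ≤ j := by omega
            have hjk : j < k := by nlinarith
            refine Or.inr (Or.inr
              ((pvDivLoopP_large_mem d mkl (d.toNat + 1) 2 k (le_refl _) hf).2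
                ⟨j, hj2, by nlinarith, by omega, ⟨k, by rw [hj]; ring⟩, ?_, by omega, by omega⟩))
            rw [PySem.Int.floordiv_eq_ediv_of_pos (show (0:Int) < j by omega), hj,
              Int.mul_ediv_cancel _ (by omega)]
    · rw [List.pairwise_append]
      refine ⟨pvDivLoopP_small_sorted d mkl (d.toNat + 1) 2 (le_refl _) hf, ?_, ?_⟩
      · rw [List.pairwise_reverse]
        rw [List.pairwise_append]
        refine ⟨?_, pvDivLoopP_large_sorted d mkl (d.toNat + 1) 2 (le_refl _) hf, ?_⟩
        · by_cases hdm : d ≤ mkl <;> simp [hdm]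
        · intro a ha y hy
          have hk : a = d := by
            by_cases hdm : d ≤ mkl
            · simpa [hdm] using ha
            · simp [hdm] at ha
          subst hk
          obtain ⟨h1, h2, h3, h4, h5⟩ := hlargeFact y hy
          exact h5
      · intro x hx y hy
        rw [List.mem_reverse] at hy
        obtain ⟨hx1, hx2, hx3, hx4⟩ := hsmallFact x hx
        have hyy : d < y * y ∧ 0 ≤ y := by
          rcases List.mem_append.1 hy with h0 | hl
          · have hk : y = d := by
              by_cases hdm : d ≤ mkl
              · simpa [hdm] using h0
              · simp [hdm] at h0
            subst hk
            exact ⟨by nlinarith, by omega⟩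
          · obtain ⟨h1, h2, h3, h4, h5⟩ := hlargeFact y hl
            exact ⟨h4, by omega⟩
        rcases lt_or_ge x y with hlt | hge
        · exact hlt
        · exfalso
          have : y * y ≤ x * x := mul_le_mul hge hge hyy.2 (by omega)
          omega
    · exact (PySem.List.pairwise_lt_pyRange_one 2 _).filter _
  · have hmin : min (d + 1) (mkl + 1) ≤ 2 := by omega
    simp only [pvPerB, if_neg hg]
    unfold pvTarget
    rw [PySem.List.pyRange_one_eq_nil hmin]
    rfl

theorem factors_eq (distances : List Int) (mkl : Int) :
    distances.foldl (fun acc distance =>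
      (PySem.List.pyRange 2 (min (distance + 1) (mkl + 1)) 1).foldl
        (fun acc2 i => if PySem.Int.mod distance i == 0 then acc2 ++ [i] else acc2) acc) [] =
    distances.foldl (fun acc d =>
      if 2 ≤ d ∧ 2 ≤ mkl then
        let large0 : List Int := if d ≤ mkl then [d] else []
        let sl := pvDivLoop d mkl 2 (d.toNat + 1) ([], [])
        acc ++ sl.1 ++ (large0 ++ sl.2).reverse
      else acc) [] := by
  have h1 : (fun (acc : List Int) distance =>
      (PySem.List.pyRange 2 (min (distance + 1) (mkl + 1)) 1).foldl
        (fun acc2 i => if PySem.Int.mod distance i == 0 then acc2 ++ [i] else acc2) acc)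
      = fun acc distance => acc ++ pvTarget distance mkl := by
    funext acc distance
    exact PySem.List.foldl_append_if_eq_filter _ _ _
  have h2 : (fun (acc : List Int) d =>
      if 2 ≤ d ∧ 2 ≤ mkl then
        let large0 : List Int := if d ≤ mkl then [d] else []
        let sl := pvDivLoop d mkl 2 (d.toNat + 1) ([], [])
        acc ++ sl.1 ++ (large0 ++ sl.2).reverse
      else acc)
      = fun acc d => acc ++ pvTarget d mkl := by
    funext acc d
    rw [← pvPerB_eq_pvTarget]
    by_cases hg : 2 ≤ d ∧ 2 ≤ mkl
    · simp [pvPerB, hg, pvDivLoop_eq_pure, List.append_assoc]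
    · simp [pvPerB, hg]
  rw [h1, h2]

-- ===== VERDICT (by name: the statement is the Claim_ definition above) =====
theorem analyze_distances_spec : Claim_equal_analyze_distances := by
  intro distances max_key_length _
  unfold Spec_analyze_distances analyze_distances analyze_distances_alt
  rw [factors_eq distances max_key_length]
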